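-- pv_equiv track=rewrite | github.com/lukablaskovic/FIPU-RS | RS5 - Mikroservisna arhitektura/examples/e-commerce-app/auth-service/server.py | _connection_from_identities
-- ===== SOURCE A (Python) =====
-- from typing import Any
--
-- def _connection_from_identities(sub: str, identities: list[dict[str, Any]]) -> str | None:
--     if "|" not in sub:
--         return None
--     provider, raw_user_id = sub.split("|", 1)
--     if not provider or not raw_user_id:
--         return None
--
--     for ident in identities:
--         if not isinstance(ident, dict):
--             continue
--         if ident.get("provider") == provider and ident.get("user_id") == raw_user_id:
--             conn = ident.get("connection")
--             if isinstance(conn, str) and conn: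
--                 return conn
--
--     for ident in identities:
--         if not isinstance(ident, dict):
--             continue
--         conn = ident.get("connection")
--         if isinstance(conn, str) and conn:
--             return conn
--
--     return None
-- ===== SOURCE B (Python) =====
-- def _connection_from_identities(sub: str, identities: list) -> str | None:
--     if "|" not in sub:
--         return None
--     provider, raw_user_id = sub.split("|", 1)
--     if not provider or not raw_user_id:
--         return None
--
--     fallback = None
--     for ident in identities:
--         if not isinstance(ident, dict):
--             continue
--         conn = ident.get("connection")
--         if not (isinstance(conn, str) and conn):
--             continue
--         if ident.get("provider") == provider and ident.get("user_id") == raw_user_id: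
--             return conn
--         if fallback is None:
--             fallback = conn
--     return fallback
-- ===== Notes on version B (the rewrite author's own statement) =====
-- stated objective: simpler
-- what changed: Replaces A's two sequential scans (exact-match pass, then first-valid-connection pass) with a single pass that returns on an exact match and latches the first valid connection as a fallback.
import Mathlib
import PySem

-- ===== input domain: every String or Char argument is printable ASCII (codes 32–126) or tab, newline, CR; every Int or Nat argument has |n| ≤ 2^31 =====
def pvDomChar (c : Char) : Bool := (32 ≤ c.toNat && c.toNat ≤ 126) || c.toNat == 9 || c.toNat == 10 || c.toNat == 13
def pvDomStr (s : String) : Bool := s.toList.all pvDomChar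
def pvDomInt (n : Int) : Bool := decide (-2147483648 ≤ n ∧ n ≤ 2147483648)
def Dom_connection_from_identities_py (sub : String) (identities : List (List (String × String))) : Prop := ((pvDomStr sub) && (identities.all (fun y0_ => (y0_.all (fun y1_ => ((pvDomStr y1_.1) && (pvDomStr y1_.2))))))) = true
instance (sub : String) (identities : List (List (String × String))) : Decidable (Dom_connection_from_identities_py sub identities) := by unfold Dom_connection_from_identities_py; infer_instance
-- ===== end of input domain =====

-- B replaces A's two sequential scans with one pass carrying a first-valid-connection fallback; objective: simpler.
-- (identities are typed dicts of strings here, so A's isinstance checks are always true and are dropped in both ports.)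

-- ===== PORT A =====
-- first loop of A: exact provider/user_id match with a valid (non-empty) connection
def pvAExact (provider raw_user_id : String) : List (List (String × String)) → Option String
  | [] => none
  | ident :: rest =>
    if (PySem.Dict.get? (PySem.Dict.mk ident) "provider" == some provider)
        && (PySem.Dict.get? (PySem.Dict.mk ident) "user_id" == some raw_user_id) then
      match PySem.Dict.get? (PySem.Dict.mk ident) "connection" with
      | some conn => if conn ≠ "" then some conn else pvAExact provider raw_user_id rest
      | none => pvAExact provider raw_user_id rest
    else pvAExact provider raw_user_id rest

-- second loop of A: first valid connection
def pvAFirst : List (List (String × String)) → Option String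
  | [] => none
  | ident :: rest =>
    match PySem.Dict.get? (PySem.Dict.mk ident) "connection" with
    | some conn => if conn ≠ "" then some conn else pvAFirst rest
    | none => pvAFirst rest

def connection_from_identities_py (sub : String) (identities : List (List (String × String))) : Option String :=
  if ¬ PySem.Str.isIn "|" sub then none
  else
    match PySem.Str.splitMax? sub "|" 1 with
    | some (provider :: raw_user_id :: _) =>
      if provider = "" ∨ raw_user_id = "" then none
      else
        match pvAExact provider raw_user_id identities with
        | some conn => some conn
        | none => pvAFirst identities
    | _ => none  -- unreachable: split with non-empty sep yields ≥ 2 parts when sep occurs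

-- ===== PORT B =====
-- single pass of B, carrying the latched fallback
def pvBGo (provider raw_user_id : String) (fallback : Option String) :
    List (List (String × String)) → Option String
  | [] => fallback
  | ident :: rest =>
    match PySem.Dict.get? (PySem.Dict.mk ident) "connection" with
    | some conn =>
      if conn ≠ "" then
        if (PySem.Dict.get? (PySem.Dict.mk ident) "provider" == some provider)
            && (PySem.Dict.get? (PySem.Dict.mk ident) "user_id" == some raw_user_id) then
          some conn
        else
          pvBGo provider raw_user_id (if fallback = none then some conn else fallback) rest
      else pvBGo provider raw_user_id fallback rest
    | none => pvBGo provider raw_user_id fallback rest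

def connection_from_identities_py_alt (sub : String) (identities : List (List (String × String))) : Option String :=
  if ¬ PySem.Str.isIn "|" sub then none
  else
    match PySem.Str.splitMax? sub "|" 1 with
    | none => none
    | some [] => none
    | some [_] => none
    | some (provider :: raw_user_id :: _) =>
      if provider = "" ∨ raw_user_id = "" then none
      else pvBGo provider raw_user_id none identities

-- ===== PRECONDITION & SPEC =====
def Spec_connection_from_identities_py (sub : String) (identities : List (List (String × String))) (out : Option String) : Prop := out = connection_from_identities_py_alt sub identities
instance (sub : String) (identities : List (List (String × String))) (out : Option String) : Decidable (Spec_connection_from_identities_py sub identities out) := by unfold Spec_connection_from_identities_py; infer_instance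

-- ===== CLAIM (what is proved, stated in full; the proofs are below) =====
def Claim_equal_connection_from_identities_py : Prop := ∀ (sub : String) (identities : List (List (String × String))), Dom_connection_from_identities_py sub identities → Spec_connection_from_identities_py sub identities (connection_from_identities_py sub identities)

-- ===== LEMMAS AND PROOFS =====

-- B's single pass equals: first exact match, else the fallback, else the first valid connection.
theorem pvBGo_eq (provider raw_user_id : String) (fb : Option String)
    (l : List (List (String × String))) :
    pvBGo provider raw_user_id fb l
      = ((pvAExact provider raw_user_id l).or (fb.or (pvAFirst l))) := by
  induction l generalizing fb with
  | nil => simp [pvBGo, pvAExact, pvAFirst]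
  | cons ident rest ih =>
    simp only [pvBGo, pvAExact, pvAFirst]
    cases hconn : PySem.Dict.get? (PySem.Dict.mk ident) "connection" with
    | none =>
      cases hm : (PySem.Dict.get? (PySem.Dict.mk ident) "provider" == some provider)
          && (PySem.Dict.get? (PySem.Dict.mk ident) "user_id" == some raw_user_id) <;>
        simp [ih]
    | some conn =>
      by_cases hne : conn = "" <;>
        cases hm : (PySem.Dict.get? (PySem.Dict.mk ident) "provider" == some provider)
            && (PySem.Dict.get? (PySem.Dict.mk ident) "user_id" == some raw_user_id)
      · simp [hne, ih]
      · simp [hne, ih]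
      · cases fb <;> simp [hne, ih]
      · simp [hne]

-- ===== VERDICT (by name: the statement is the Claim_ definition above) =====
theorem connection_from_identities_py_spec : Claim_equal_connection_from_identities_py := by
  intro sub identities _
  unfold Spec_connection_from_identities_py
  unfold connection_from_identities_py connection_from_identities_py_alt
  by_cases hin : PySem.Str.isIn "|" sub = true
  · rw [if_neg (not_not_intro hin), if_neg (not_not_intro hin)]
    cases hsp : PySem.Str.splitMax? sub "|" 1 with
    | none => rfl
    | some parts =>
      match parts with
      | [] => rfl
      | [_] => rfl
      | provider :: raw :: t =>
        by_cases hpr : provider = "" ∨ raw = ""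
        · simp [hpr]
        · simp only [if_neg hpr, pvBGo_eq]
          cases pvAExact provider raw identities <;> simp [Option.or]
  · rw [if_pos hin, if_pos hin]
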